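-- pv_equiv track=rewrite | github.com/ienConor23/kursour | arasaka_tool.py | format_fio_result
-- ===== SOURCE A (Python) =====
-- def format_fio_result(data):
--     if not data or 'data' not in data or not data['data']:
--         return "По данному ФИО ничего не найдено"
--
--     result_text = "РЕЗУЛЬТАТЫ ПОИСКА ПО ФИО\n\n"
--
--     for i, item in enumerate(data['data'], 1):
--         result_text += f"РЕЗУЛЬТАТ #{i}\n"
--
--         if 'name' in item:
--             result_text += f"ФИО: {item['name']}\n"
--         if 'inn' in item:
--             result_text += f"ИНН: {item['inn']}\n"
--         if 'ogrn' in item: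
--             result_text += f"ОГРН: {item['ogrn']}\n"
--         if 'status' in item:
--             result_text += f"Статус: {item['status']}\n"
--         if 'registration_date' in item:
--             result_text += f"Дата регистрации: {item['registration_date']}\n"
--
--         result_text += "\n"
--
--     return result_text
-- ===== SOURCE B (Python) =====
-- FIELDS = [
--     ('name', 'ФИО'),
--     ('inn', 'ИНН'),
--     ('ogrn', 'ОГРН'),
--     ('status', 'Статус'),
--     ('registration_date', 'Дата регистрации'),
-- ]
--
--
-- def _blocks(items, i):
--     """Recursively render each item as its own joined block."""
--     if not items:
--         return ""
--     item = items[0]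
--     parts = [f"РЕЗУЛЬТАТ #{i}"]
--     parts += [f"{label}: {item[key]}" for key, label in FIELDS if key in item]
--     return "\n".join(parts) + "\n\n" + _blocks(items[1:], i + 1)
--
--
-- def format_fio_result(data):
--     items = data.get('data') if data else None
--     if not items:
--         return "По данному ФИО ничего не найдено"
--     return "РЕЗУЛЬТАТЫ ПОИСКА ПО ФИО\n\n" + _blocks(items, 1)
-- ===== Notes on version B (the rewrite author's own statement) =====
-- stated objective: alternative
-- what changed: B renders recursively: a helper recurses over the item list, builds each item's lines from an ordered (key,label) field table and joins them per block, prepending the header once, instead of A's single enumerate loop with an unrolled per-field if-chain and string +=.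
import Mathlib
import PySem

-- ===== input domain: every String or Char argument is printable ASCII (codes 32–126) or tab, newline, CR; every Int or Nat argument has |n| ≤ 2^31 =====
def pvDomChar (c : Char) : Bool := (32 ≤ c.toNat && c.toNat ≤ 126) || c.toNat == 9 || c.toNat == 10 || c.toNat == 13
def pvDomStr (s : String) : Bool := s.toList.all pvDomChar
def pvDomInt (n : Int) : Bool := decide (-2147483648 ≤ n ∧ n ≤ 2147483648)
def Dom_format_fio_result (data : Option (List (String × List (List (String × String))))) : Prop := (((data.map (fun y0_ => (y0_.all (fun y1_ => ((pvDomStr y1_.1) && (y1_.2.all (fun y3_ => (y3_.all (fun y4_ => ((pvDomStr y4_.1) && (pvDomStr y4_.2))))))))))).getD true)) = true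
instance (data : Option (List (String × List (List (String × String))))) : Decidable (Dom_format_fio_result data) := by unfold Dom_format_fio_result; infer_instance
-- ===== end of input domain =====

-- B renders recursively over the item list, joining each item's field-table lines per block,
-- instead of A's single enumerate loop with an unrolled per-field if-chain; objective: alternative decomposition.

-- first-match association-list lookup (Python dict lookup)
def pvLookup? {α : Type} (d : List (String × α)) (k : String) : Option α :=
  match d with
  | [] => none
  | (a, b) :: rest => if a == k then some b else pvLookup? rest k

-- ===== PORT A =====
-- loop body of A's for-loop (string accumulator, per-field if-chain)
def pvBodyA (acc : String) (p : Int × List (String × String)) : String :=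
  let acc := acc ++ "РЕЗУЛЬТАТ #" ++ PySem.Int.toStr p.1 ++ "\n"
  let acc := match pvLookup? p.2 "name" with
             | some v => acc ++ "ФИО: " ++ v ++ "\n" | none => acc
  let acc := match pvLookup? p.2 "inn" with
             | some v => acc ++ "ИНН: " ++ v ++ "\n" | none => acc
  let acc := match pvLookup? p.2 "ogrn" with
             | some v => acc ++ "ОГРН: " ++ v ++ "\n" | none => acc
  let acc := match pvLookup? p.2 "status" with
             | some v => acc ++ "Статус: " ++ v ++ "\n" | none => acc
  let acc := match pvLookup? p.2 "registration_date" with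
             | some v => acc ++ "Дата регистрации: " ++ v ++ "\n" | none => acc
  acc ++ "\n"

def format_fio_result (data : Option (List (String × List (List (String × String))))) : String :=
  match data with
  | none => "По данному ФИО ничего не найдено"
  | some d =>
    match pvLookup? d "data" with
    | none => "По данному ФИО ничего не найдено"
    | some items =>
      if items.isEmpty then "По данному ФИО ничего не найдено"
      else
        (PySem.List.enumerate items 1).foldl pvBodyA "РЕЗУЛЬТАТЫ ПОИСКА ПО ФИО\n\n"

-- ===== PORT B =====
def pvFields : List (String × String) :=
  [("name", "ФИО"), ("inn", "ИНН"), ("ogrn", "ОГРН"),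
   ("status", "Статус"), ("registration_date", "Дата регистрации")]

-- B's recursive helper _blocks(items, i)
def pvBlocks (items : List (List (String × String))) (i : Int) : String :=
  match items with
  | [] => ""
  | item :: rest =>
    let parts := ("РЕЗУЛЬТАТ #" ++ PySem.Int.toStr i) ::
      pvFields.filterMap (fun f => (pvLookup? item f.1).map (fun v => f.2 ++ ": " ++ v))
    PySem.Str.join "\n" parts ++ "\n\n" ++ pvBlocks rest (i + 1)

def format_fio_result_alt (data : Option (List (String × List (List (String × String))))) : String :=
  let items := match data with
               | none => none
               | some d => pvLookup? d "data"
  match items with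
  | none => "По данному ФИО ничего не найдено"
  | some its =>
    if its.isEmpty then "По данному ФИО ничего не найдено"
    else "РЕЗУЛЬТАТЫ ПОИСКА ПО ФИО\n\n" ++ pvBlocks its 1

-- ===== PRECONDITION & SPEC =====
def Spec_format_fio_result (data : Option (List (String × List (List (String × String))))) (out : String) : Prop := out = format_fio_result_alt data
instance (data : Option (List (String × List (List (String × String))))) (out : String) : Decidable (Spec_format_fio_result data out) := by unfold Spec_format_fio_result; infer_instance

-- ===== CLAIM (what is proved, stated in full; the proofs are below) =====
def Claim_equal_format_fio_result : Prop := ∀ (data : Option (List (String × List (List (String × String))))), Dom_format_fio_result data → Spec_format_fio_result data (format_fio_result data)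

-- ===== LEMMAS AND PROOFS =====

-- one item's lines (with terminating newlines) as a flat string, A-style
def pvItemLines (p : Int × List (String × String)) : List String :=
  ("РЕЗУЛЬТАТ #" ++ PySem.Int.toStr p.1) ::
    pvFields.filterMap (fun f => (pvLookup? p.2 f.1).map (fun v => f.2 ++ ": " ++ v))

def pvStrConcat (xs : List String) : String := xs.foldl (· ++ ·) ""

theorem pvFoldl_append_init (xs : List String) (a : String) :
    xs.foldl (· ++ ·) a = a ++ pvStrConcat xs := by
  induction xs generalizing a with
  | nil => simp [pvStrConcat]
  | cons x xs ih =>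
    simp only [pvStrConcat, List.foldl_cons]
    rw [ih, ih]
    simp [String.append_assoc]

theorem pvStrConcat_cons (x : String) (xs : List String) :
    pvStrConcat (x :: xs) = x ++ pvStrConcat xs := by
  simp only [pvStrConcat, List.foldl_cons]
  rw [pvFoldl_append_init]
  simp [pvStrConcat]

theorem pvBodyA_eq (acc : String) (p : Int × List (String × String)) :
    pvBodyA acc p = acc ++ pvStrConcat ((pvItemLines p).map (· ++ "\n")) ++ "\n" := by
  rcases h1 : pvLookup? p.2 "name" with _ | v1 <;>
  rcases h2 : pvLookup? p.2 "inn" with _ | v2 <;>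
  rcases h3 : pvLookup? p.2 "ogrn" with _ | v3 <;>
  rcases h4 : pvLookup? p.2 "status" with _ | v4 <;>
  rcases h5 : pvLookup? p.2 "registration_date" with _ | v5 <;>
  simp [pvBodyA, pvItemLines, pvFields, h1, h2, h3, h4, h5, pvStrConcat,
        String.append_assoc] <;>
  simp [← String.append_assoc]

theorem pvJoin_cons_cons (sep p q : String) (rest : List String) :
    PySem.Str.join sep (p :: q :: rest) = p ++ sep ++ PySem.Str.join sep (q :: rest) := by
  rw [← String.toList_inj]
  simp [PySem.Str.toList_join, PySem.Chars.join_cons_cons]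

theorem pvJoin_singleton (sep p : String) : PySem.Str.join sep [p] = p := by
  rw [← String.toList_inj]
  simp [PySem.Str.toList_join, PySem.Chars.join_singleton]

-- joining nonempty lines with '\n' and adding a final '\n' = concatenating newline-terminated lines
theorem pvJoin_newlines (ls : List String) (h : ls ≠ []) :
    PySem.Str.join "\n" ls ++ "\n" = pvStrConcat (ls.map (· ++ "\n")) := by
  induction ls with
  | nil => exact absurd rfl h
  | cons a rest ih =>
    cases rest with
    | nil => simp [pvJoin_singleton, pvStrConcat]
    | cons b t =>
      rw [List.map_cons, pvStrConcat_cons, ← ih (by simp), pvJoin_cons_cons]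
      simp [String.append_assoc]

-- main invariant: A's loop from accumulator acc over enumerate equals acc ++ B's recursive blocks
theorem pvMain (items : List (List (String × String))) (i : Int) (acc : String) :
    (PySem.List.enumerate items i).foldl pvBodyA acc = acc ++ pvBlocks items i := by
  induction items generalizing i acc with
  | nil => simp [PySem.List.enumerate_nil, pvBlocks]
  | cons item rest ih =>
    rw [PySem.List.enumerate_cons, List.foldl_cons, ih, pvBodyA_eq, pvBlocks,
        ← pvJoin_newlines _ (by simp [pvItemLines])]
    simp [pvItemLines, String.append_assoc]

-- ===== VERDICT (by name: the statement is the Claim_ definition above) =====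
theorem format_fio_result_spec : Claim_equal_format_fio_result := by
  intro data _
  unfold Spec_format_fio_result format_fio_result format_fio_result_alt
  cases data with
  | none => rfl
  | some d =>
    simp only
    cases h : pvLookup? d "data" with
    | none => simp
    | some items =>
      simp only
      rcases eq_or_ne items [] with he | he
      · simp [he]
      · have he' : items.isEmpty = false := by simp [he]
        simp only [he', Bool.false_eq_true, if_false]
        rw [pvMain]
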